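-- pv_equiv track=rewrite | github.com/pavanKarthik2006/GeneXtract | infer_llm.py | detokenize_with_offsets
-- ===== SOURCE A (Python) =====
-- from typing import List, Tuple, Dict, Any, Optional
--
-- _PUNCT_NO_SPACE_BEFORE = set(list(".,!?;:%)]}"))
--
-- _PUNCT_NO_SPACE_AFTER  = set(list("([{"))
--
-- def detokenize_with_offsets(tokens: List[str], attach_punct: bool = True) -> Tuple[str, List[Tuple[int, int]]]:
--     text_parts: List[str] = []
--     offsets: List[Tuple[int, int]] = []
--     pos = 0
--     for i, tok in enumerate(tokens):
--         add_space_before = bool(text_parts)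
--         if attach_punct:
--             if tok in _PUNCT_NO_SPACE_BEFORE:
--                 add_space_before = False
--             if i > 0 and tokens[i - 1] in _PUNCT_NO_SPACE_AFTER:
--                 add_space_before = False
--         if add_space_before:
--             text_parts.append(" ")
--             pos += 1
--         start = pos
--         text_parts.append(tok)
--         pos += len(tok)
--         end = pos
--         offsets.append((start, end))
--     return "".join(text_parts), offsets
-- ===== SOURCE B (Python) =====
-- _PUNCT_NO_SPACE_BEFORE = set(".,!?;:%)]}")
-- _PUNCT_NO_SPACE_AFTER = set("([{")
--
-- def detokenize_with_offsets(tokens, attach_punct=True):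
--     # Stage 1: partition the tokens into maximal runs ("groups") that are glued
--     # together without spaces; a token joins the current group iff punctuation
--     # attachment suppresses the space before it.
--     groups = []
--     for i, tok in enumerate(tokens):
--         glue = (i > 0 and attach_punct
--                 and (tok in _PUNCT_NO_SPACE_BEFORE
--                      or tokens[i - 1] in _PUNCT_NO_SPACE_AFTER))
--         if glue:
--             groups[-1].append(tok)
--         else:
--             groups.append([tok])
--     # Stage 2: the text is simply the groups joined by single spaces.
--     text = " ".join("".join(g) for g in groups)
--     # Stage 3: offsets, group by group (each group after the first is preceded
--     # by one space).
--     offsets = []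
--     pos = 0
--     for j, g in enumerate(groups):
--         if j:
--             pos += 1
--         for tok in g:
--             offsets.append((pos, pos + len(tok)))
--             pos += len(tok)
--     return text, offsets
-- ===== Notes on version B (the rewrite author's own statement) =====
-- stated objective: alternative
-- what changed: A's single stateful loop (mutable parts/offsets/pos with a per-token space decision) is replaced by a run-based algorithm: partition the tokens into maximal glued runs, produce the text as ' '.join of the concatenated runs, then emit offsets run by run with one space before each run after the first.
import Mathlib
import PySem

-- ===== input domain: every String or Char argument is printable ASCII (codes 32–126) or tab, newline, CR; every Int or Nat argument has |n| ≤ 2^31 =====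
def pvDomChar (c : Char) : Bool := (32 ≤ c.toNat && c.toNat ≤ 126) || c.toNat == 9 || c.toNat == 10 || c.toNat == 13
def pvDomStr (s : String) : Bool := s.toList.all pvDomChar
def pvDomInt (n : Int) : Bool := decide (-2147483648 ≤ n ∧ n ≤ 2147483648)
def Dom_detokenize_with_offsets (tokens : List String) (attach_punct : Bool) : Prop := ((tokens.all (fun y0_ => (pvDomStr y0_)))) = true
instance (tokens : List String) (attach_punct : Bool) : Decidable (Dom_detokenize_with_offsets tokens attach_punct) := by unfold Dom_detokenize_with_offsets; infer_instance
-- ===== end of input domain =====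

-- B replaces A's single stateful loop by a run-based algorithm: partition tokens into maximal glued runs, join the runs with single spaces, then emit offsets run by run (same cost; objective: alternative).


-- ===== PORT A =====
def pvNSB : PySem.Set String := PySem.Set.ofList [".", ",", "!", "?", ";", ":", "%", ")", "]", "}"]
def pvNSA : PySem.Set String := PySem.Set.ofList ["(", "[", "{"]

-- the loop body of A (named helper; `tokens[i-1]` is only read under the guard 0 < i, where the index is valid, so pyGetD's default is never used)
def pvBodyA (tokens : List String) (attach_punct : Bool)
    (st : List String × List (Int × Int) × Int) (p : Int × String) :
    List String × List (Int × Int) × Int :=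
  let parts := st.1
  let offsets := st.2.1
  let pos := st.2.2
  let i := p.1
  let tok := p.2
  let asb0 : Bool := !parts.isEmpty
  let asb : Bool :=
    if attach_punct then
      let a1 := if PySem.Set.contains pvNSB tok then false else asb0
      if decide (0 < i) && PySem.Set.contains pvNSA (PySem.List.pyGetD tokens (i - 1) "") then false
      else a1
    else asb0
  let parts := if asb then parts ++ [" "] else parts
  let pos := if asb then pos + 1 else pos
  let start := pos
  let parts := parts ++ [tok]
  let pos := pos + PySem.Str.len tok
  (parts, offsets ++ [(start, pos)], pos)

def detokenize_with_offsets (tokens : List String) (attach_punct : Bool) : String × (List (Int × Int)) :=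
  let st := (PySem.List.enumerate tokens).foldl (pvBodyA tokens attach_punct) ([], [], 0)
  (PySem.Str.join "" st.1, st.2.1)

-- ===== PORT B =====
-- stage 1 of Source B: one step of the grouping loop (groups[-1].append(tok) is only reached when glue holds, i.e. i > 0, so groups is nonempty there and getLastD's default is never used)
def pvGroupStep (tokens : List String) (attach_punct : Bool)
    (gs : List (List String)) (p : Int × String) : List (List String) :=
  let glue : Bool := decide (0 < p.1) && attach_punct &&
      (PySem.Set.contains pvNSB p.2 || PySem.Set.contains pvNSA (PySem.List.pyGetD tokens (p.1 - 1) ""))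
  if glue then gs.dropLast ++ [gs.getLastD [] ++ [p.2]] else gs ++ [[p.2]]

-- stage 3 of Source B: the inner `for tok in g` loop
def pvEmit (st : List (Int × Int) × Int) (g : List String) : List (Int × Int) × Int :=
  g.foldl (fun st2 tok => (st2.1 ++ [(st2.2, st2.2 + PySem.Str.len tok)], st2.2 + PySem.Str.len tok)) st

-- stage 3 of Source B: the body of `for j, g in enumerate(groups)`
def pvOffsetsBody (st : List (Int × Int) × Int) (p : Int × List String) : List (Int × Int) × Int :=
  let pos : Int := if p.1 ≠ 0 then st.2 + 1 else st.2
  pvEmit (st.1, pos) p.2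

def detokenize_with_offsets_alt (tokens : List String) (attach_punct : Bool) : String × (List (Int × Int)) :=
  let groups := (PySem.List.enumerate tokens).foldl (pvGroupStep tokens attach_punct) []
  let text := PySem.Str.join " " (groups.map (fun g => PySem.Str.join "" g))
  let r := (PySem.List.enumerate groups).foldl pvOffsetsBody ([], 0)
  (text, r.1)

-- ===== PRECONDITION & SPEC =====
def Spec_detokenize_with_offsets (tokens : List String) (attach_punct : Bool) (out : String × (List (Int × Int))) : Prop := out = detokenize_with_offsets_alt tokens attach_punct
instance (tokens : List String) (attach_punct : Bool) (out : String × (List (Int × Int))) : Decidable (Spec_detokenize_with_offsets tokens attach_punct out) := by unfold Spec_detokenize_with_offsets; infer_instance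

-- ===== CLAIM (what is proved, stated in full; the proofs are below) =====
def Claim_equal_detokenize_with_offsets : Prop := ∀ (tokens : List String) (attach_punct : Bool), Dom_detokenize_with_offsets tokens attach_punct → Spec_detokenize_with_offsets tokens attach_punct (detokenize_with_offsets tokens attach_punct)

-- ===== LEMMAS AND PROOFS =====

-- glue decision given the previous token: token attaches to the run of its predecessor
def pvGlue (attach : Bool) (prev tok : String) : Bool :=
  attach && (PySem.Set.contains pvNSB tok || PySem.Set.contains pvNSA prev)

-- A's space decision (none = first token)
def pvSep (attach : Bool) (prev tok : String) : Bool := !(pvGlue attach prev tok)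

-- reference recursion: pieces, offsets and final position for a suffix of tokens
def pvGo (attach : Bool) : Option String → Int → List String → List String × List (Int × Int) × Int
  | _, pos, [] => ([], [], pos)
  | prev?, pos, tok :: rest =>
    let s : Bool := match prev? with | none => false | some prev => pvSep attach prev tok
    let start := pos + (if s then 1 else 0)
    let r := pvGo attach (some tok) (start + PySem.Str.len tok) rest
    ((if s then [" ", tok] else [tok]) ++ r.1, (start, start + PySem.Str.len tok) :: r.2.1, r.2.2)

-- reference recursion for B's grouping: cur is the run under construction, prev the last token seen
def pvGrp (attach : Bool) (cur : List String) (prev : String) : List String → List (List String)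
  | [] => [cur]
  | t :: ts => if pvGlue attach prev t then pvGrp attach (cur ++ [t]) t ts
               else cur :: pvGrp attach [t] t ts

-- stage-3 reference: first group emitted at the current position, each later group after one space
def pvAfter : List (List String) → (List (Int × Int) × Int) → (List (Int × Int) × Int)
  | [], st => st
  | g :: gs, st => gs.foldl (fun st g => pvEmit (st.1, st.2 + 1) g) (pvEmit st g)

lemma pvGetD_last (pre rest : List String) (prev : String) (h : pre.getLast? = some prev) :
    PySem.List.pyGetD (pre ++ rest) ((pre.length : Int) - 1) "" = prev := by
  have hne : pre ≠ [] := by intro h0; simp [h0] at h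
  have hlen : 1 ≤ pre.length := List.length_pos_iff.mpr hne
  have h1 : ((pre.length : Int) - 1) = ((pre.length - 1 : Nat) : Int) := by omega
  rw [h1, PySem.List.pyGetD_natCast, List.getD_eq_getElem?_getD,
      List.getElem?_append_left (by omega), ← List.getLast?_eq_getElem?, h]
  rfl

lemma pvA_loop (attach : Bool) :
    ∀ (rest pre parts : List String) (offs : List (Int × Int)) (pos : Int),
    parts.isEmpty = pre.isEmpty →
    (PySem.List.enumerate rest (pre.length : Int)).foldl (pvBodyA (pre ++ rest) attach) (parts, offs, pos)
      = (parts ++ (pvGo attach pre.getLast? pos rest).1,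
         offs ++ (pvGo attach pre.getLast? pos rest).2.1,
         (pvGo attach pre.getLast? pos rest).2.2) := by
  intro rest
  induction rest with
  | nil => intro pre parts offs pos h; simp [pvGo, PySem.List.enumerate]
  | cons tok rest' ih =>
    intro pre parts offs pos h
    rw [PySem.List.enumerate_cons, List.foldl_cons]
    rcases List.eq_nil_or_concat pre with hpre | ⟨pre₀, prev, hpre⟩
    · subst hpre
      have hp : parts = [] := by simpa using h
      subst hp
      have hb : pvBodyA ([] ++ tok :: rest') attach ([], offs, pos) (((([] : List String)).length : Int), tok)
          = ([tok], offs ++ [(pos, pos + PySem.Str.len tok)], pos + PySem.Str.len tok) := by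
        simp [pvBodyA]
      rw [hb]
      have h1 : (((([] : List String)).length : Int) + 1) = ((([tok] : List String)).length : Int) := by simp
      have h2 : ([] ++ tok :: rest' : List String) = [tok] ++ rest' := rfl
      rw [h1, h2, ih [tok] [tok] (offs ++ [(pos, pos + PySem.Str.len tok)]) (pos + PySem.Str.len tok) rfl]
      simp [pvGo, List.append_assoc]
    · rw [List.concat_eq_append] at hpre
      subst hpre
      have hlast : (pre₀ ++ [prev]).getLast? = some prev := by simp
      have hparts : parts.isEmpty = false := by rw [h]; simp
      have hget : PySem.List.pyGetD ((pre₀ ++ [prev]) ++ tok :: rest') (((pre₀ ++ [prev]).length : Int) - 1) "" = prev :=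
        pvGetD_last _ _ _ hlast
      have hlenpos : 0 < (pre₀ ++ [prev]).length := by simp
      have hdec : decide ((0:Int) < (((pre₀ ++ [prev]).length : Nat) : Int)) = true :=
        decide_eq_true (by exact_mod_cast hlenpos)
      have hs : pvBodyA ((pre₀ ++ [prev]) ++ tok :: rest') attach (parts, offs, pos) ((((pre₀ ++ [prev]).length : Nat) : Int), tok)
          = ((if pvSep attach prev tok then parts ++ [" "] else parts) ++ [tok],
             offs ++ [((if pvSep attach prev tok then pos + 1 else pos),
                       (if pvSep attach prev tok then pos + 1 else pos) + PySem.Str.len tok)],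
             (if pvSep attach prev tok then pos + 1 else pos) + PySem.Str.len tok) := by
        have hbool : ∀ (a n s : Bool),
            (if a then (if n then false else (if s then false else true)) else true)
              = !(a && (s || n)) := by decide
        simp only [pvBodyA, hget, hparts, hdec, Bool.not_false, Bool.true_and, pvSep, pvGlue, hbool]
        rfl
      rw [hs]
      have h1 : ((((pre₀ ++ [prev]).length : Nat) : Int) + 1) = (((((pre₀ ++ [prev]) ++ [tok]) : List String)).length : Int) := by
        simp <;> omega
      have h2 : ((pre₀ ++ [prev]) ++ tok :: rest' : List String) = ((pre₀ ++ [prev]) ++ [tok]) ++ rest' := by simp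
      rw [h1, h2, ih ((pre₀ ++ [prev]) ++ [tok]) _ _ _
        (by
          have hie : ∀ (l m : List String) (x : String), (l ++ x :: m).isEmpty = false := by
            intro l m x; cases l; rfl; rfl
          by_cases hc : pvSep attach prev tok = true <;> simp only [hc] <;>
            (try simp only [if_true]) <;> rw [hie, hie])]
      have hlast2 : ((((pre₀ ++ [prev]) ++ [tok]) : List String)).getLast? = some tok := by simp
      rw [hlast2, hlast]
      simp only [pvGo]
      have hif : (if pvSep attach prev tok = true then pos + 1 else pos)
          = pos + (if pvSep attach prev tok = true then (1:Int) else 0) := by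
        by_cases hc : pvSep attach prev tok = true <;> simp [hc]
      have hparts2 : (if pvSep attach prev tok = true then parts ++ [" "] else parts) ++ [tok]
          = parts ++ (if pvSep attach prev tok = true then [" ", tok] else [tok]) := by
        by_cases hc : pvSep attach prev tok = true <;> simp [hc]
      rw [hif, hparts2]
      simp [List.append_assoc]

lemma pvGrp_ne_nil (attach : Bool) :
    ∀ (rest cur : List String) (prev : String), pvGrp attach cur prev rest ≠ [] := by
  intro rest
  induction rest with
  | nil => intro cur prev; simp [pvGrp]
  | cons t ts ih =>
    intro cur prev
    by_cases hg : pvGlue attach prev t = true <;> simp [pvGrp, hg, ih]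

-- B's grouping loop computes pvGrp
lemma pvG_loop (attach : Bool) :
    ∀ (rest pre : List String) (done : List (List String)) (cur : List String) (prev : String),
    pre.getLast? = some prev →
    (PySem.List.enumerate rest (pre.length : Int)).foldl (pvGroupStep (pre ++ rest) attach) (done ++ [cur])
      = done ++ pvGrp attach cur prev rest := by
  intro rest
  induction rest with
  | nil => intro pre done cur prev h; simp [pvGrp, PySem.List.enumerate]
  | cons t ts ih =>
    intro pre done cur prev h
    rw [PySem.List.enumerate_cons, List.foldl_cons]
    have hne : pre ≠ [] := by intro h0; simp [h0] at h
    have hlenpos : 0 < pre.length := List.length_pos_iff.mpr hne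
    have hdec : decide ((0:Int) < ((pre.length : Nat) : Int)) = true :=
      decide_eq_true (by exact_mod_cast hlenpos)
    have hget : PySem.List.pyGetD (pre ++ t :: ts) ((pre.length : Int) - 1) "" = prev :=
      pvGetD_last _ _ _ h
    have hstep : pvGroupStep (pre ++ t :: ts) attach (done ++ [cur]) (((pre.length : Nat) : Int), t)
        = if pvGlue attach prev t then done ++ [cur ++ [t]] else (done ++ [cur]) ++ [[t]] := by
      simp only [pvGroupStep, hget, hdec, Bool.true_and, pvGlue]
      split_ifs with hg <;> simp
    rw [hstep]
    have h1 : (((pre.length : Nat) : Int) + 1) = (((pre ++ [t] : List String)).length : Int) := by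
      simp
    have h2 : (pre ++ t :: ts : List String) = (pre ++ [t]) ++ ts := by simp
    have hlast : (pre ++ [t] : List String).getLast? = some t := by simp
    by_cases hg : pvGlue attach prev t = true
    · rw [if_pos hg, h1, h2, ih (pre ++ [t]) done (cur ++ [t]) t hlast]
      simp [pvGrp, hg]
    · rw [if_neg hg, h1, h2, ih (pre ++ [t]) (done ++ [cur]) [t] t hlast]
      simp only [pvGrp, hg, Bool.false_eq_true, if_false, List.append_assoc,
        List.singleton_append]

lemma pvJoinNilFlatten (xs : List (List Char)) : PySem.Chars.join [] xs = xs.flatten := by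
  induction xs with
  | nil => rfl
  | cons a t ih =>
    cases t with
    | nil => simp [PySem.Chars.join_singleton]
    | cons b r => rw [PySem.Chars.join_cons_cons]; simp_all

-- the text of the grouped form equals the concatenation of A's pieces
lemma pvText (attach : Bool) :
    ∀ (rest : List String) (prev : String) (cur : List String) (pos : Int),
    PySem.Chars.join [' '] ((pvGrp attach cur prev rest).map (fun g => PySem.Chars.join [] (g.map String.toList)))
      = (cur.map String.toList).flatten ++ ((pvGo attach (some prev) pos rest).1.map String.toList).flatten := by
  intro rest
  induction rest with
  | nil =>
    intro prev cur pos
    simp [pvGrp, pvGo, PySem.Chars.join_singleton, pvJoinNilFlatten]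
  | cons t ts ih =>
    intro prev cur pos
    by_cases hg : pvGlue attach prev t = true
    · have hs : pvSep attach prev t = false := by simp [pvSep, hg]
      rw [show pvGrp attach cur prev (t :: ts) = pvGrp attach (cur ++ [t]) t ts by simp [pvGrp, hg]]
      rw [ih t (cur ++ [t]) ((pos + (if pvSep attach prev t then (1:Int) else 0)) + PySem.Str.len t)]
      simp [pvGo, hs, List.append_assoc]
    · have hs : pvSep attach prev t = true := by simp [pvSep, hg]
      rw [show pvGrp attach cur prev (t :: ts) = cur :: pvGrp attach [t] t ts by simp [pvGrp, hg]]
      cases hG : pvGrp attach [t] t ts with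
      | nil => exact absurd hG (pvGrp_ne_nil attach ts [t] t)
      | cons g gs =>
        rw [List.map_cons, show ((g :: gs).map (fun g => PySem.Chars.join [] (g.map String.toList)))
              = PySem.Chars.join [] (g.map String.toList) :: gs.map (fun g => PySem.Chars.join [] (g.map String.toList)) from rfl,
            PySem.Chars.join_cons_cons,
            show PySem.Chars.join [] (g.map String.toList) :: gs.map (fun g => PySem.Chars.join [] (g.map String.toList))
              = (pvGrp attach [t] t ts).map (fun g => PySem.Chars.join [] (g.map String.toList)) by rw [hG]; rfl,
            ih t [t] ((pos + (if pvSep attach prev t then (1:Int) else 0)) + PySem.Str.len t)]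
        simp [pvGo, hs, pvJoinNilFlatten, List.append_assoc]

lemma pvEmit_append (st : List (Int × Int) × Int) (g1 g2 : List String) :
    pvEmit st (g1 ++ g2) = pvEmit (pvEmit st g1) g2 := by
  simp [pvEmit, List.foldl_append]

-- once past the first group, the index in enumerate(groups) is never 0, so the body always adds the space
lemma pvEnum_shift :
    ∀ (gs : List (List String)) (j : Int) (st : List (Int × Int) × Int), 1 ≤ j →
    (PySem.List.enumerate gs j).foldl pvOffsetsBody st
      = gs.foldl (fun st g => pvEmit (st.1, st.2 + 1) g) st := by
  intro gs
  induction gs with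
  | nil => intro j st hj; simp [PySem.List.enumerate]
  | cons g gs ih =>
    intro j st hj
    rw [PySem.List.enumerate_cons, List.foldl_cons, List.foldl_cons]
    have hj0 : j ≠ 0 := by omega
    rw [show pvOffsetsBody st (j, g) = pvEmit (st.1, st.2 + 1) g by simp [pvOffsetsBody, hj0]]
    exact ih (j + 1) _ (by omega)

-- the offsets of the grouped form equal A's offsets
lemma pvOff (attach : Bool) :
    ∀ (rest : List String) (prev : String) (cur : List String) (offs : List (Int × Int)) (pos : Int),
    pvAfter (pvGrp attach cur prev rest) (offs, pos)
      = ((pvEmit (offs, pos) cur).1 ++ (pvGo attach (some prev) (pvEmit (offs, pos) cur).2 rest).2.1,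
         (pvGo attach (some prev) (pvEmit (offs, pos) cur).2 rest).2.2) := by
  intro rest
  induction rest with
  | nil => intro prev cur offs pos; simp [pvGrp, pvAfter, pvGo]
  | cons t ts ih =>
    intro prev cur offs pos
    by_cases hg : pvGlue attach prev t = true
    · have hs : pvSep attach prev t = false := by simp [pvSep, hg]
      rw [show pvGrp attach cur prev (t :: ts) = pvGrp attach (cur ++ [t]) t ts by simp [pvGrp, hg]]
      rw [ih t (cur ++ [t]) offs pos, pvEmit_append]
      simp [pvGo, hs, pvEmit, List.append_assoc]
    · have hs : pvSep attach prev t = true := by simp [pvSep, hg]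
      rw [show pvGrp attach cur prev (t :: ts) = cur :: pvGrp attach [t] t ts by simp [pvGrp, hg]]
      cases hG : pvGrp attach [t] t ts with
      | nil => exact absurd hG (pvGrp_ne_nil attach ts [t] t)
      | cons g gs =>
        rw [show pvAfter (cur :: g :: gs) (offs, pos)
              = pvAfter (g :: gs) ((pvEmit (offs, pos) cur).1, (pvEmit (offs, pos) cur).2 + 1) from rfl,
            ← hG, ih t [t] (pvEmit (offs, pos) cur).1 ((pvEmit (offs, pos) cur).2 + 1)]
        simp [pvGo, hs, pvEmit, List.append_assoc, add_assoc]

-- ===== VERDICT (by name: the statement is the Claim_ definition above) =====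
theorem detokenize_with_offsets_spec : Claim_equal_detokenize_with_offsets := by
  intro tokens attach _
  unfold Spec_detokenize_with_offsets
  cases tokens with
  | nil => rfl
  | cons t0 ts =>
    unfold detokenize_with_offsets detokenize_with_offsets_alt
    -- A side: close the loop
    have hA := pvA_loop attach (t0 :: ts) [] [] [] 0 rfl
    simp only [List.nil_append, List.length_nil, Nat.cast_zero, List.getLast?_nil] at hA
    rw [hA]
    -- B side: the grouping loop computes pvGrp
    have hfirst : pvGroupStep (t0 :: ts) attach [] ((0 : Int), t0) = [] ++ [[t0]] := by
      simp [pvGroupStep]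
    have hG0 := pvG_loop attach ts [t0] [] [t0] t0 rfl
    simp only [List.singleton_append, List.length_cons, List.length_nil, Nat.cast_one,
      zero_add, List.nil_append] at hG0
    rw [PySem.List.enumerate_cons, List.foldl_cons, hfirst]
    simp only [List.nil_append]
    rw [show ((0 : Int) + 1) = (1 : Int) by norm_num, hG0]
    -- the two components
    refine Prod.ext ?_ ?_
    · -- text
      apply String.toList_inj.mp
      simp only [PySem.Str.toList_join, List.map_map]
      have hmap : ((pvGrp attach [t0] t0 ts).map (String.toList ∘ fun g => PySem.Str.join "" g))
          = (pvGrp attach [t0] t0 ts).map (fun g => PySem.Chars.join [] (g.map String.toList)) := by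
        apply List.map_congr_left
        intro g _
        simp [PySem.Str.toList_join]
      rw [show (" " : String).toList = [' '] from rfl, hmap,
          pvText attach ts t0 [t0] ((0 : Int) + PySem.Str.len t0)]
      rw [show ("" : String).toList = [] from rfl, pvJoinNilFlatten]
      simp [pvGo]
    · -- offsets
      cases hG : pvGrp attach [t0] t0 ts with
      | nil => exact absurd hG (pvGrp_ne_nil attach ts [t0] t0)
      | cons g gs =>
        rw [PySem.List.enumerate_cons, List.foldl_cons]
        rw [show pvOffsetsBody ([], (0 : Int)) ((0 : Int), g) = pvEmit ([], 0) g by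
              simp [pvOffsetsBody]]
        rw [pvEnum_shift gs (0 + 1) (pvEmit ([], 0) g) (by norm_num)]
        rw [show gs.foldl (fun st g => pvEmit (st.1, st.2 + 1) g) (pvEmit ([], 0) g)
              = pvAfter (g :: gs) ([], 0) from rfl, ← hG,
            pvOff attach ts t0 [t0] [] 0]
        simp [pvGo, pvEmit]
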